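-- pv_equiv track=rewrite | github.com/Dixith-ai/Learning-Python | _files/advanced/valid_number_string.py | is_valid_number_with_count
-- ===== SOURCE A (Python) =====
-- def is_valid_number_with_count(s):
--     s = s.strip()
--     if not s:
--         return False, 0
--
--     has_digit = False
--     has_dot = False
--     has_e = False
--     digit_count = 0
--
--     for i, char in enumerate(s):
--         if char.isdigit():
--             has_digit = True
--             digit_count += 1
--         elif char == '.':
--             if has_dot or has_e:
--                 return False, 0
--             has_dot = True
--         elif char in 'eE':
--             if has_e or not has_digit:
--                 return False, 0
--             has_e = True
--             has_digit = False
--         elif char in '+-':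
--             if i != 0 and s[i-1] not in 'eE':
--                 return False, 0
--         else:
--             return False, 0
--
--     return has_digit, digit_count
-- ===== SOURCE B (Python) =====
-- def _part(p, allow_dot):
--     digits = 0
--     dot = False
--     for j, c in enumerate(p):
--         if c.isdigit():
--             digits += 1
--         elif c == '.':
--             if not allow_dot or dot:
--                 return False, 0, False
--             dot = True
--         elif c in '+-':
--             if j != 0:
--                 return False, 0, False
--         else:
--             return False, 0, False
--     return True, digits, digits > 0
--
--
-- def is_valid_number_with_count(s):
--     s = s.strip()
--     if not s:
--         return False, 0
--     low = s.lower()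
--     if 'e' in low:
--         i = low.index('e')
--         m, x = s[:i], s[i + 1:]
--         if 'e' in x.lower():
--             return False, 0
--         okm, dm, _ = _part(m, True)
--         if not okm or dm == 0:
--             return False, 0
--         okx, dx, hx = _part(x, False)
--         if not okx:
--             return False, 0
--         return hx, dm + dx
--     okm, dm, hm = _part(s, True)
--     if not okm:
--         return False, 0
--     return hm, dm
-- ===== Notes on version B (the rewrite author's own statement) =====
-- stated objective: alternative
-- what changed: A validates with one stateful left-to-right automaton (has_digit/has_dot/has_e flags with index look-back s[i-1]); B instead splits the stripped string at the unique 'e'/'E' and validates mantissa and exponent independently with one shared part-scanner, combining their digit counts.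
import Mathlib
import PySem

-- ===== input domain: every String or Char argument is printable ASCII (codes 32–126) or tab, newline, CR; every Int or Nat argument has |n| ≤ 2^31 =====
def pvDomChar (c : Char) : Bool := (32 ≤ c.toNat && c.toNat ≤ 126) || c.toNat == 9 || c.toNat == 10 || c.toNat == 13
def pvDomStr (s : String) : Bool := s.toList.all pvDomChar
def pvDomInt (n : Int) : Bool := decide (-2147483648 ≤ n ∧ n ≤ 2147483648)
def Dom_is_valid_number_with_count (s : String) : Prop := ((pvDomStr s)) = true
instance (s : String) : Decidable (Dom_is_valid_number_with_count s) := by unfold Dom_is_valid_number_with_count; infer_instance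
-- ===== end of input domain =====

-- B splits the stripped string at the unique 'e'/'E' and validates mantissa and exponent with one
-- shared part-scanner, instead of A's single state-machine loop (different decomposition; no speed claim).

-- ===== PORT A =====
-- A's loop over enumerate(s): state (has_digit, has_dot, has_e, digit_count), index i;
-- `none` encodes every early `return False, 0`.  `char in 'eE'` / `in '+-'` are the
-- one-character membership tests, ported as equality tests; s[i-1] is PySem.List.pyGet?.
def aRun (s : List Char) : List Char → Int → Bool → Bool → Bool → Int →
    Option (Bool × Bool × Bool × Int)
  | [], _, hd, dot, he, cnt => some (hd, dot, he, cnt)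
  | c :: rest, i, hd, dot, he, cnt =>
    if PySem.Chars.isdigit c then aRun s rest (i + 1) true dot he (cnt + 1)
    else if c == '.' then
      if dot || he then none else aRun s rest (i + 1) hd true he cnt
    else if c == 'e' || c == 'E' then
      if he || !hd then none else aRun s rest (i + 1) false dot true cnt
    else if c == '+' || c == '-' then
      if i != 0 && !(PySem.List.pyGet? s (i - 1) == some 'e'
                     || PySem.List.pyGet? s (i - 1) == some 'E') then none
      else aRun s rest (i + 1) hd dot he cnt
    else none

def aMain (t : List Char) : Bool × Int :=
  if t = [] then (false, 0)
  else
    match aRun t t 0 false false false 0 with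
    | none => (false, 0)
    | some st => (st.1, st.2.2.2)

def is_valid_number_with_count (s : String) : Bool × Int :=
  aMain (PySem.Str.strip s).toList

-- ===== PORT B =====
-- Source B's _part(p, allow_dot): returns (ok, digits, digits > 0); j is the enumerate index.
def partScan : List Char → Int → Int → Bool → Bool → Bool × Int × Bool
  | [], _, digits, _, _ => (true, digits, decide (0 < digits))
  | c :: rest, j, digits, dot, allowDot =>
    if PySem.Chars.isdigit c then partScan rest (j + 1) (digits + 1) dot allowDot
    else if c == '.' then
      if !allowDot || dot then (false, 0, false)
      else partScan rest (j + 1) digits true allowDot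
    else if c == '+' || c == '-' then
      if j != 0 then (false, 0, false) else partScan rest (j + 1) digits dot allowDot
    else (false, 0, false)

-- Source B's main body after the strip/empty test; `'e' in low` + `low.index('e')` is one
-- PySem.List.index? match; s[:i] and s[i+1:] are PySem.List.slice.
def bMain (t : List Char) : Bool × Int :=
  if t = [] then (false, 0)
  else
    match PySem.List.index? (PySem.Chars.lower t) 'e' with
    | some i =>
      let m := PySem.List.slice t (some 0) (some (i : Int))
      let x := PySem.List.slice t (some ((i : Int) + 1)) none
      if (PySem.Chars.lower x).contains 'e' then (false, 0)
      else
        let pm := partScan m 0 0 false true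
        if !pm.1 || pm.2.1 == 0 then (false, 0)
        else
          let px := partScan x 0 0 false false
          if !px.1 then (false, 0) else (px.2.2, pm.2.1 + px.2.1)
    | none =>
      let pm := partScan t 0 0 false true
      if !pm.1 then (false, 0) else (pm.2.2, pm.2.1)

def is_valid_number_with_count_alt (s : String) : Bool × Int :=
  bMain (PySem.Str.strip s).toList

-- ===== PRECONDITION & SPEC =====
def Spec_is_valid_number_with_count (s : String) (out : Bool × Int) : Prop := out = is_valid_number_with_count_alt s
instance (s : String) (out : Bool × Int) : Decidable (Spec_is_valid_number_with_count s out) := by unfold Spec_is_valid_number_with_count; infer_instance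

-- ===== CLAIM (what is proved, stated in full; the proofs are below) =====
def Claim_equal_is_valid_number_with_count : Prop := ∀ (s : String), Dom_is_valid_number_with_count s → Spec_is_valid_number_with_count s (is_valid_number_with_count s)

-- ===== LEMMAS AND PROOFS =====

-- `c in 'eE'`
def isE (c : Char) : Bool := c == 'e' || c == 'E'

theorem lowerChar_eq_e {c : Char} (h : PySem.Chars.lowerChar c = 'e') : c = 'e' ∨ c = 'E' := by
  revert h
  unfold PySem.Chars.lowerChar PySem.Chars.isupper
  split_ifs with hU
  · intro h
    right
    simp only [Bool.and_eq_true, decide_eq_true_eq] at hU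
    have hb1 : 65 ≤ c.toNat := by
      simpa [Char.le_def, UInt32.le_iff_toNat_le] using hU.1
    have hb2 : c.toNat ≤ 90 := by
      simpa [Char.le_def, UInt32.le_iff_toNat_le] using hU.2
    have hv : (c.toNat + 32).isValidChar := by left; omega
    have h2 := congrArg Char.toNat h
    rw [Char.toNat_ofNat _, if_pos hv] at h2
    have h3 : c.toNat = ('E' : Char).toNat := by
      have : ('e' : Char).toNat = 101 := by decide
      have : c.toNat = 69 := by omega
      simpa using this
    exact Char.ext (UInt32.toNat_inj.mp h3)
  · exact Or.inl

theorem isE_of_lowerChar {c : Char} (h : PySem.Chars.lowerChar c = 'e') : isE c = true := by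
  rcases lowerChar_eq_e h with rfl | rfl <;> decide

theorem lowerChar_of_isE {c : Char} (h : isE c = true) : PySem.Chars.lowerChar c = 'e' := by
  simp only [isE, Bool.or_eq_true, beq_iff_eq] at h
  rcases h with rfl | rfl <;> decide

theorem isE_false_of_digit {c : Char} (h : PySem.Chars.isdigit c = true) : isE c = false := by
  cases he : isE c with
  | false => rfl
  | true =>
    exfalso
    simp only [isE, Bool.or_eq_true, beq_iff_eq] at he
    rcases he with rfl | rfl <;> simp [PySem.Chars.isdigit] at h

theorem ne_of_isE_false {c : Char} (h : isE c = false) : c ≠ 'e' ∧ c ≠ 'E' := by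
  simp only [isE, Bool.or_eq_false_iff, beq_eq_false_iff_ne, ne_eq] at h
  exact h

theorem aRun_append (t u v : List Char) :
    ∀ (i : Int) (hd dot he : Bool) (cnt : Int),
      aRun t (u ++ v) i hd dot he cnt =
        (aRun t u i hd dot he cnt).bind
          (fun st => aRun t v (i + u.length) st.1 st.2.1 st.2.2.1 st.2.2.2) := by
  induction u with
  | nil => intro i hd dot he cnt; simp [aRun]
  | cons c rest ih =>
    intro i hd dot he cnt
    have hlen : ((rest.length + 1 : Nat) : Int) = (rest.length : Int) + 1 := by push_cast; ring
    simp only [List.cons_append, aRun, List.length_cons, hlen]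
    have harith : i + 1 + (rest.length : Int) = i + ((rest.length : Int) + 1) := by ring
    split_ifs <;> simp [ih, harith]

theorem aRun_he_of_e (t : List Char) :
    ∀ (x : List Char) (i : Int) (hd dot : Bool) (cnt : Int),
      (∃ c ∈ x, isE c = true) → aRun t x i hd dot true cnt = none := by
  intro x
  induction x with
  | nil => intro i hd dot cnt h; rcases h with ⟨c, hc, _⟩; simp at hc
  | cons c rest ih =>
    intro i hd dot cnt h
    simp only [aRun]
    by_cases hdig : PySem.Chars.isdigit c = true
    · rw [if_pos hdig]
      apply ih
      rcases h with ⟨c', hc', he'⟩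
      rcases List.mem_cons.mp hc' with rfl | hm
      · exact absurd he' (by simp [isE_false_of_digit hdig])
      · exact ⟨c', hm, he'⟩
    · rw [if_neg hdig]
      by_cases hdot : (c == '.') = true
      · simp [hdot]
      · rw [if_neg hdot]
        by_cases hce : (c == 'e' || c == 'E') = true
        · simp [hce]
        · rw [if_neg hce]
          by_cases hsg : (c == '+' || c == '-') = true
          · rw [if_pos hsg]
            split_ifs with hguard
            · rfl
            · apply ih
              rcases h with ⟨c', hc', he'⟩
              rcases List.mem_cons.mp hc' with rfl | hm
              · exact absurd he' (by simp [isE, hce])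
              · exact ⟨c', hm, he'⟩
          · rw [if_neg hsg]
  
-- mantissa phase: processing a segment with has_e = false matches partScan with allow_dot = True
theorem run_part_mantissa (t tail : List Char) :
    ∀ (suf pre : List Char) (d : Int) (dot : Bool),
      t = pre ++ (suf ++ tail) →
      (∀ c ∈ pre, isE c = false) → (∀ c ∈ suf, isE c = false) → 0 ≤ d →
      (aRun t suf (pre.length) (decide (0 < d)) dot false d = none ∧
         (partScan suf (pre.length) d dot true).1 = false) ∨
      (∃ d' dot', 0 ≤ d' ∧
         aRun t suf (pre.length) (decide (0 < d)) dot false d =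
           some (decide (0 < d'), dot', false, d') ∧
         partScan suf (pre.length) d dot true = (true, d', decide (0 < d'))) := by
  intro suf
  induction suf with
  | nil =>
    intro pre d dot ht hpre hsuf hd0
    right
    exact ⟨d, dot, hd0, rfl, rfl⟩
  | cons c rest ih =>
    intro pre d dot ht hpre hsuf hd0
    have hlen : (((pre ++ [c]).length : Nat) : Int) = (pre.length : Int) + 1 := by
      simp
    have hcE : isE c = false := hsuf c (List.mem_cons_self ..)
    have hrest : ∀ c' ∈ rest, isE c' = false := fun c' hc' => hsuf c' (List.mem_cons_of_mem _ hc')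
    have hpre' : ∀ c' ∈ pre ++ [c], isE c' = false := by
      intro c' hc'
      rcases List.mem_append.mp hc' with hm | hm
      · exact hpre c' hm
      · simp at hm; subst hm; exact hcE
    have ht' : t = (pre ++ [c]) ++ (rest ++ tail) := by simp [ht]
    simp only [aRun, partScan]
    by_cases hdig : PySem.Chars.isdigit c = true
    · rw [if_pos hdig, if_pos hdig]
      have h1 : decide (0 < d + 1) = true := decide_eq_true (by omega)
      have := ih (pre ++ [c]) (d + 1) dot ht' hpre' hrest (by omega)
      rw [hlen, h1] at this
      exact this
    · rw [if_neg hdig, if_neg hdig]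
      by_cases hdot : (c == '.') = true
      · rw [if_pos hdot, if_pos hdot]
        cases dot with
        | true =>
          rw [if_pos (by simp), if_pos (by simp)]
          exact Or.inl ⟨rfl, rfl⟩
        | false =>
          rw [if_neg (by simp), if_neg (by simp)]
          have := ih (pre ++ [c]) d true ht' hpre' hrest hd0
          rw [hlen] at this
          exact this
      · rw [if_neg hdot, if_neg hdot]
        rw [if_neg (by simp [isE] at hcE; simp [hcE.1, hcE.2] : ¬((c == 'e' || c == 'E') = true))]
        by_cases hsg : (c == '+' || c == '-') = true
        · rw [if_pos hsg, if_pos hsg]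
          rcases List.eq_nil_or_concat pre with rfl | ⟨pre', p, rfl⟩
          · -- i = 0 : sign allowed on both sides
            simp only [List.length_nil, Nat.cast_zero]
            rw [if_neg (by simp), if_neg (by simp)]
            have := ih ([] ++ [c]) d dot (by simpa using ht') (by simpa using hpre') hrest hd0
            simpa using this
          · -- i ≠ 0 and previous char is a non-e mantissa char : both reject
            left
            simp only [List.concat_eq_append] at ht hpre hlen hpre' ht' ⊢
            have hp : isE p = false := hpre p (by simp)
            have hget : PySem.List.pyGet? t (((pre' ++ [p]).length : Int) - 1) = some p := by
              have ht2 : t = pre' ++ (p :: (c :: rest ++ tail)) := by simp [ht]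
              have hix : ((pre' ++ [p]).length : Int) - 1 = ((pre'.length : Nat) : Int) := by
                push_cast [List.length_append, List.length_cons, List.length_nil]
                ring
              rw [hix, ht2]
              exact PySem.List.pyGet?_append_length _ _ _
            rcases ne_of_isE_false hp with ⟨hp1, hp2⟩
            constructor
            · rw [if_pos (by rw [hget]; simp [hp1, hp2]; omega)]
            · rw [if_pos (by simp; omega)]
        · rw [if_neg hsg, if_neg hsg]
          exact Or.inl ⟨rfl, rfl⟩

-- exponent phase: has_e = true, previous char at the segment start is the 'e'/'E'
theorem run_part_exp (t m : List Char) (eC : Char) (dm : Int) (heC : isE eC = true) :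
    ∀ (suf pre2 : List Char) (dx : Int) (dot : Bool),
      t = m ++ eC :: (pre2 ++ suf) →
      (∀ c ∈ pre2, isE c = false) → (∀ c ∈ suf, isE c = false) → 0 ≤ dx →
      (aRun t suf ((m.length : Int) + 1 + (pre2.length : Int)) (decide (0 < dx)) dot true (dm + dx) = none ∧
         (partScan suf (pre2.length) dx dot false).1 = false) ∨
      (∃ dx', 0 ≤ dx' ∧
         aRun t suf ((m.length : Int) + 1 + (pre2.length : Int)) (decide (0 < dx)) dot true (dm + dx) =
           some (decide (0 < dx'), dot, true, dm + dx') ∧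
         partScan suf (pre2.length) dx dot false = (true, dx', decide (0 < dx'))) := by
  have heC' : (some eC == some 'e' || some eC == some 'E') = true := by
    simp only [isE, Bool.or_eq_true, beq_iff_eq] at heC
    rcases heC with rfl | rfl <;> rfl
  intro suf
  induction suf with
  | nil =>
    intro pre2 dx dot ht hpre hsuf hd0
    right
    exact ⟨dx, hd0, rfl, rfl⟩
  | cons c rest ih =>
    intro pre2 dx dot ht hpre hsuf hd0
    have hlen : (((pre2 ++ [c]).length : Nat) : Int) = (pre2.length : Int) + 1 := by
      simp
    have hcE : isE c = false := hsuf c (List.mem_cons_self ..)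
    have hrest : ∀ c' ∈ rest, isE c' = false := fun c' hc' => hsuf c' (List.mem_cons_of_mem _ hc')
    have hpre' : ∀ c' ∈ pre2 ++ [c], isE c' = false := by
      intro c' hc'
      rcases List.mem_append.mp hc' with hm | hm
      · exact hpre c' hm
      · simp at hm; subst hm; exact hcE
    have ht' : t = m ++ eC :: ((pre2 ++ [c]) ++ rest) := by simp [ht]
    have harith : (m.length : Int) + 1 + (pre2.length : Int) + 1
        = (m.length : Int) + 1 + ((pre2.length : Int) + 1) := by ring
    simp only [aRun, partScan]
    by_cases hdig : PySem.Chars.isdigit c = true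
    · rw [if_pos hdig, if_pos hdig]
      have h1 : decide (0 < dx + 1) = true := decide_eq_true (by omega)
      have h2 : dm + dx + 1 = dm + (dx + 1) := by ring
      have := ih (pre2 ++ [c]) (dx + 1) dot ht' hpre' hrest (by omega)
      rw [hlen, h1] at this
      rw [h2, harith]
      exact this
    · rw [if_neg hdig, if_neg hdig]
      by_cases hdot : (c == '.') = true
      · rw [if_pos hdot, if_pos hdot]
        rw [if_pos (by simp), if_pos (by simp)]
        exact Or.inl ⟨rfl, rfl⟩
      · rw [if_neg hdot, if_neg hdot]
        rw [if_neg (by simp [isE] at hcE; simp [hcE.1, hcE.2] : ¬((c == 'e' || c == 'E') = true))]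
        by_cases hsg : (c == '+' || c == '-') = true
        · rw [if_pos hsg, if_pos hsg]
          rcases List.eq_nil_or_concat pre2 with rfl | ⟨pre2', p, rfl⟩
          · -- start of the exponent : previous char is the e, sign allowed on both sides
            simp only [List.length_nil, Nat.cast_zero, add_zero]
            have hget : PySem.List.pyGet? t ((m.length : Int) + 1 - 1) = some eC := by
              have hix : (m.length : Int) + 1 - 1 = ((m.length : Nat) : Int) := by ring
              rw [hix, ht]
              exact PySem.List.pyGet?_append_length _ _ _
            rw [if_neg (by rw [hget, heC']; simp), if_neg (by simp)]
            have := ih ([] ++ [c]) dx dot (by simpa using ht') (by simpa using hpre') hrest hd0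
            simpa [harith] using this
          · -- inside the exponent : previous char is a non-e digit/sign : both reject
            left
            simp only [List.concat_eq_append] at ht hpre hlen hpre' ht' harith ⊢
            have hp : isE p = false := hpre p (by simp)
            have hget : PySem.List.pyGet? t
                ((m.length : Int) + 1 + ((pre2' ++ [p]).length : Int) - 1) = some p := by
              have ht2 : t = (m ++ eC :: pre2') ++ (p :: (c :: rest)) := by simp [ht]
              have hix : (m.length : Int) + 1 + ((pre2' ++ [p]).length : Int) - 1
                  = (((m ++ eC :: pre2').length : Nat) : Int) := by
                push_cast [List.length_append, List.length_cons, List.length_nil]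
                ring
              rw [hix, ht2]
              exact PySem.List.pyGet?_append_length _ _ _
            rcases ne_of_isE_false hp with ⟨hp1, hp2⟩
            constructor
            · rw [if_pos (by rw [hget]; simp [hp1, hp2]; omega)]
            · rw [if_pos (by simp; omega)]
        · rw [if_neg hsg, if_neg hsg]
          exact Or.inl ⟨rfl, rfl⟩

theorem isE_false_of_not_mem_lower {t : List Char} {c : Char}
    (h : 'e' ∉ PySem.Chars.lower t) (hc : c ∈ t) : isE c = false := by
  cases he : isE c with
  | false => rfl
  | true =>
    exfalso
    exact h (by
      unfold PySem.Chars.lower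
      exact List.mem_map.mpr ⟨c, hc, lowerChar_of_isE he⟩)


theorem isdigit_false_of_isE {c : Char} (h : isE c = true) : PySem.Chars.isdigit c = false := by
  simp only [isE, Bool.or_eq_true, beq_iff_eq] at h
  rcases h with rfl | rfl <;> decide

theorem dot_false_of_isE {c : Char} (h : isE c = true) : (c == '.') = false := by
  simp only [isE, Bool.or_eq_true, beq_iff_eq] at h
  rcases h with rfl | rfl <;> decide

-- with allow_dot = False the dot flag is never consulted
theorem partScan_dot_irrel (x : List Char) :
    ∀ (j d : Int) (dot : Bool), partScan x j d dot false = partScan x j d false false := by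
  induction x with
  | nil => intro j d dot; rfl
  | cons c rest ih =>
    intro j d dot
    simp only [partScan, Bool.not_false, Bool.true_or]
    split_ifs <;> simp [ih]

theorem core_eq (t : List Char) : aMain t = bMain t := by
  by_cases hemp : t = []
  · simp [aMain, bMain, hemp]
  · cases hidx : PySem.List.index? (PySem.Chars.lower t) 'e' with
    | none =>
      -- no 'e' in the whole string : one mantissa-only scan on both sides
      have hnoe : ∀ c ∈ t, isE c = false :=
        fun c hc => isE_false_of_not_mem_lower ((PySem.List.index?_eq_none_iff _ _).mp hidx) hc
      rw [PySem.List.index?_eq_idxOf?] at hidx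
      rcases run_part_mantissa t [] t [] 0 false (by simp) (by simp) hnoe (le_refl 0) with
        ⟨h1, h2⟩ | ⟨d', dot', hd0, h1, h2⟩ <;>
        norm_num at h1 h2 <;>
        simp [aMain, bMain, if_neg hemp, hidx, h1, h2]
    | some i =>
      -- t = l₁ ++ c :: x with isE c, no e/E in l₁
      obtain ⟨pre', suf', hlow, hlen', hnotmem⟩ := (PySem.List.index?_eq_some_iff _ _ _).mp hidx
      rw [PySem.List.index?_eq_idxOf?] at hidx
      have hmap : List.map PySem.Chars.lowerChar t = pre' ++ 'e' :: suf' := hlow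
      obtain ⟨l₁, l₂, ht12, hm1, hm2⟩ := List.map_eq_append_iff.mp hmap
      obtain ⟨c, x, hl2, hc, hx⟩ := List.map_eq_cons_iff.mp hm2
      subst hl2
      have ht : t = l₁ ++ c :: x := ht12
      have hcE : isE c = true := isE_of_lowerChar hc
      have hcbeq : (c == 'e' || c == 'E') = true := by simpa [isE] using hcE
      have hl1len : l₁.length = i := by rw [← hlen', ← hm1]; simp
      have hl1 : ∀ c' ∈ l₁, isE c' = false := by
        intro c' hc'
        cases hE : isE c' with
        | false => rfl
        | true =>
          exact absurd (hm1 ▸ List.mem_map_of_mem hc' :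
            PySem.Chars.lowerChar c' ∈ pre') (by rw [lowerChar_of_isE hE]; exact hnotmem)
      have htake : List.take i t = l₁ := by rw [ht, ← hl1len, List.take_left]
      have hmslice : PySem.List.slice t (some 0) (some (i : Int)) = l₁ := by
        rw [PySem.List.slice_zero_start, PySem.List.slice_to_natCast, htake]
      have hxslice : PySem.List.slice t (some ((i : Int) + 1)) none = x := by
        have h1 : ((i : Int)) + 1 = ((i + 1 : Nat) : Int) := by push_cast; ring
        have h2 : t = (l₁ ++ [c]) ++ x := by simp [ht]
        have h3 : (l₁ ++ [c]).length = i + 1 := by simp [hl1len]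
        rw [h1, PySem.List.slice_from_natCast, h2, ← h3, List.drop_left]
      -- A's single pass, split at the 'e'
      have hsplit := aRun_append t l₁ (c :: x) 0 false false false 0
      have htt : aRun t t 0 false false false 0 = aRun t (l₁ ++ c :: x) 0 false false false 0 :=
        congrArg (fun l => aRun t l 0 false false false 0) ht
      rcases run_part_mantissa t (c :: x) l₁ [] 0 false (by simpa using ht) (by simp) hl1
          (le_refl 0) with ⟨h1, h2⟩ | ⟨d', dot', hd0, h1, h2⟩ <;> norm_num at h1 h2
      · -- mantissa scan fails on both sides
        have hA : aRun t t 0 false false false 0 = none := by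
          rw [htt, hsplit, h1]; rfl
        by_cases hxe : 'e' ∈ PySem.Chars.lower x
        · simp [aMain, bMain, hidx, hxslice, hA, hxe]
        · simp [aMain, bMain, hidx, hmslice, hxslice, hA, hxe, h2]
      · -- mantissa scan succeeds with d' digits; A now reads the 'e'
        have hstep : aRun t (c :: x) (0 + (l₁.length : Int)) (decide (0 < d')) dot' false d' =
            if decide (0 < d') = false then none
            else aRun t x (0 + (l₁.length : Int) + 1) false dot' true d' := by
          simp only [aRun]
          rw [if_neg (by simp [isdigit_false_of_isE hcE]),
            if_neg (by simp [dot_false_of_isE hcE]), if_pos hcbeq]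
          cases hD : decide (0 < d') <;> simp
        by_cases hd'0 : (0 : Int) < d'
        · -- mantissa has a digit : A continues into the exponent part
          have hDtrue : decide (0 < d') = true := decide_eq_true hd'0
          have hAx : aRun t t 0 false false false 0 =
              aRun t x (0 + (l₁.length : Int) + 1) false dot' true d' := by
            rw [htt, hsplit, h1]
            show aRun t (c :: x) (0 + (l₁.length : Int)) (decide (0 < d')) dot' false d' = _
            rw [hstep, hDtrue, if_neg (by simp)]
          by_cases hxe : 'e' ∈ PySem.Chars.lower x
          · -- a second 'e' : A dies inside the exponent, B rejects up front
            have hex : ∃ c' ∈ x, isE c' = true := by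
              obtain ⟨c', hc', hlc⟩ := List.mem_map.mp hxe
              exact ⟨c', hc', isE_of_lowerChar hlc⟩
            have hA : aRun t t 0 false false false 0 = none := by
              rw [hAx]; exact aRun_he_of_e t x _ _ _ _ hex
            simp [aMain, bMain, hidx, hxslice, hA, hxe]
          · -- unique 'e' : exponent scans agree
            have hxE : ∀ c' ∈ x, isE c' = false := by
              intro c' hc'
              cases hE : isE c' with
              | false => rfl
              | true =>
                exact absurd (List.mem_map.mpr ⟨c', hc', lowerChar_of_isE hE⟩ :
                  'e' ∈ List.map PySem.Chars.lowerChar x) hxe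
            rcases run_part_exp t l₁ c d' hcE x [] 0 dot' (by simpa using ht) (by simp) hxE
                (le_refl 0) with ⟨h3, h4⟩ | ⟨dx', hdx0, h3, h4⟩ <;> norm_num at h3 h4 <;>
              rw [partScan_dot_irrel] at h4
            · have hA : aRun t t 0 false false false 0 = none := by
                rw [hAx, show (0 : Int) + (l₁.length : Int) + 1 = (l₁.length : Int) + 1 by ring]
                exact h3
              simp [aMain, bMain, hidx, hmslice, hxslice, hA, hxe, h2, h4,
                show d' ≠ 0 by omega]
            · have hA : aRun t t 0 false false false 0 =
                  some (decide (0 < dx'), dot', true, d' + dx') := by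
                rw [hAx, show (0 : Int) + (l₁.length : Int) + 1 = (l₁.length : Int) + 1 by ring]
                exact h3
              simp [aMain, bMain, if_neg hemp, hidx, hmslice, hxslice, hA, hxe, h2, h4,
                show d' ≠ 0 by omega]
        · -- digitless mantissa : A dies at the 'e', B rejects dm == 0
          have hDfalse : decide (0 < d') = false := decide_eq_false hd'0
          have hA : aRun t t 0 false false false 0 = none := by
            rw [htt, hsplit, h1]
            show aRun t (c :: x) (0 + (l₁.length : Int)) (decide (0 < d')) dot' false d' = none
            rw [hstep, hDfalse]; simp
          have hd'z : d' = 0 := by omega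
          by_cases hxe : 'e' ∈ PySem.Chars.lower x
          · simp [aMain, bMain, hidx, hxslice, hA, hxe]
          · simp [aMain, bMain, hidx, hmslice, hxslice, hA, hxe, h2, hd'z]

-- ===== VERDICT (by name: the statement is the Claim_ definition above) =====
theorem is_valid_number_with_count_spec : Claim_equal_is_valid_number_with_count := by
  intro s _
  unfold Spec_is_valid_number_with_count is_valid_number_with_count is_valid_number_with_count_alt
  exact core_eq _
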